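-- pv_equiv track=rewrite | github.com/richt3211/CS-1410 | dnaSequencing.py | findBestCandidate
-- ===== SOURCE A (Python) =====
-- def findLargestOverlap(target, candidate):
-- 	if not target and not candidate:
-- 		return -1
-- 	if len(target) != len(candidate):
-- 		return -1
-- 	length = len(target)
-- 	overlap = 0
-- 	for x in range(length):
-- 		print ('target')
-- 		print (target[length -x -1: length])
-- 		print ('candidate')
-- 		print (candidate[0: x +1])
-- 		if target[length - x - 1: length] == candidate[0: x + 1]:
-- 			overlap = x + 1
-- 	if not overlap:
-- 		return (0)
-- 	else:
-- 		return overlap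
--
-- def findBestCandidate(target, string):
-- 	overlap = []
-- 	for x in range(len(string)):
-- 		overlap.append(findLargestOverlap(target, string[x]))
-- 	best_Candidate_Length = max(overlap)
-- 	best_Candidate = overlap.index(best_Candidate_Length)
-- 	if overlap[best_Candidate] == 0:
-- 		return ('', 0)
-- 	return (string[best_Candidate], overlap[best_Candidate])
-- ===== SOURCE B (Python) =====
-- def findLargestOverlap(target, candidate):
-- 	if not target and not candidate:
-- 		return -1
-- 	if len(target) != len(candidate):
-- 		return -1
-- 	length = len(target)
-- 	overlap = 0
-- 	for x in range(length):
-- 		print ('target')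
-- 		print (target[length -x -1: length])
-- 		print ('candidate')
-- 		print (candidate[0: x +1])
-- 		if target[length - x - 1: length] == candidate[0: x + 1]:
-- 			overlap = x + 1
-- 	if not overlap:
-- 		return (0)
-- 	else:
-- 		return overlap
--
-- def findBestCandidate(target, string):
-- 	# single pass: keep the first candidate with the strictly greatest overlap
-- 	best_candidate = string[0]
-- 	best_overlap = findLargestOverlap(target, best_candidate)
-- 	for s in string[1:]:
-- 		o = findLargestOverlap(target, s)
-- 		if o > best_overlap:
-- 			best_candidate, best_overlap = s, o
-- 	if best_overlap == 0:
-- 		return ('', 0)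
-- 	return (best_candidate, best_overlap)
-- ===== Notes on version B (the rewrite author's own statement) =====
-- stated objective: simpler
-- what changed: findBestCandidate no longer builds an overlap list and re-scans it with max() and .index(); it is a single pass that keeps the first candidate whose overlap is strictly greatest (initialised from the first candidate so -1 overlaps are handled).
import Mathlib
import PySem

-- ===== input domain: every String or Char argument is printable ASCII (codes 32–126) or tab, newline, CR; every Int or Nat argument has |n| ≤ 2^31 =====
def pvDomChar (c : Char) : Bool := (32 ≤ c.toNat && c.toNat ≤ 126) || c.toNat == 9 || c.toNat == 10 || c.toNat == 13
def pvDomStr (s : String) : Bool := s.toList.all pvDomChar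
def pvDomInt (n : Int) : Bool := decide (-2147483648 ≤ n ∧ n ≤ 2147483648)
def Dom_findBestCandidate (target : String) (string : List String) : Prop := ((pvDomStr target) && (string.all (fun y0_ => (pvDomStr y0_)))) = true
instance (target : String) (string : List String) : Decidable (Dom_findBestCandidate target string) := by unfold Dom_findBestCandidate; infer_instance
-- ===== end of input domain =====

-- B replaces A's overlap-list + max() + .index() re-scans by a single pass that keeps the first
-- candidate with the strictly greatest overlap (objective: simpler); equivalence is about the
-- RETURN value — the prints inside findLargestOverlap (identical in A and B) are not modelled.

-- ===== PORT A =====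
-- helper: findLargestOverlap, byte-for-byte the same in Source A and Source B (prints are I/O only);
-- works on the code-point lists of the two strings; slices are PySem slices, exact
def findLargestOverlapPort (target candidate : List Char) : Int :=
  if target = [] ∧ candidate = [] then -1
  else if ¬ (target.length = candidate.length) then -1
  else
    let length := target.length
    let overlap : Int := (List.range length).foldl (fun ov x =>
      if PySem.List.slice target (some ((length : Int) - (x : Int) - 1)) (some (length : Int)) =
         PySem.List.slice candidate (some 0) (some ((x : Int) + 1)) then ((x : Int) + 1) else ov) 0
    if overlap = 0 then 0 else overlap

def findBestCandidate (target : String) (string : List String) : String × Int :=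
  -- overlap = []; for x in range(len(string)): overlap.append(findLargestOverlap(target, string[x]))
  -- (x always in range, so string[x] is ported as getD)
  let overlap : List Int := (List.range string.length).foldl
    (fun acc x => acc ++ [findLargestOverlapPort target.toList ((string.getD x "").toList)]) []
  match PySem.List.max? overlap (fun y => y) with
  | none => ("", 0)      -- max([]) raises ValueError: outside Pre_
  | some m =>
    match PySem.List.index? overlap m with
    | none => ("", 0)    -- unreachable: m ∈ overlap
    | some i =>
      if overlap.getD i 0 = 0 then ("", 0)
      else (string.getD i "", overlap.getD i 0)

-- ===== PORT B =====
def findBestCandidate_alt (target : String) (string : List String) : String × Int :=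
  match string with
  | [] => ("", 0)        -- string[0] raises IndexError: outside Pre_
  | s :: t =>            -- best = string[0] with its overlap; loop over string[1:] (= t)
    let best := t.foldl
      (fun p c =>
        let o := findLargestOverlapPort target.toList c.toList
        if o > p.2 then (c, o) else p)
      (s, findLargestOverlapPort target.toList s.toList)
    if best.2 = 0 then ("", 0) else best

-- ===== PRECONDITION & SPEC =====
-- Pre_ excludes only the empty candidate list, on which A raises ValueError (max of empty
-- sequence) and B raises IndexError (string[0]).
def Pre_findBestCandidate (target : String) (string : List String) : Prop := string ≠ []
instance (target : String) (string : List String) : Decidable (Pre_findBestCandidate target string) := by unfold Pre_findBestCandidate; infer_instance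
def pvWitness_findBestCandidate : String × List String := ("abab", ["bbab", "abab"])

def Spec_findBestCandidate (target : String) (string : List String) (out : String × Int) : Prop := out = findBestCandidate_alt target string
instance (target : String) (string : List String) (out : String × Int) : Decidable (Spec_findBestCandidate target string out) := by unfold Spec_findBestCandidate; infer_instance

-- ===== CLAIM (what is proved, stated in full; the proofs are below) =====
def Claim_equal_findBestCandidate : Prop := ∀ (target : String) (string : List String), Dom_findBestCandidate target string → Pre_findBestCandidate target string → Spec_findBestCandidate target string (findBestCandidate target string)

-- ===== LEMMAS AND PROOFS =====

-- A's append loop over range(len(string)) builds exactly the helper mapped over string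
theorem pv_overlap_list (f : String → Int) (l : List String) :
    (List.range l.length).foldl (fun acc x => acc ++ [f (l.getD x "")]) [] = l.map f := by
  rw [PySem.List.foldl_append_singleton_eq_map]
  simp only [List.nil_append]
  apply List.ext_getElem
  · simp
  · intro i h1 h2
    simp [List.getD_eq_getElem?_getD, List.getElem?_eq_getElem (by simpa using h1 : i < l.length)]

-- B's loop keeps the first element achieving the running maximum: its result is the maximum
-- together with the element at the FIRST index achieving it (or the seed if nothing beats it)
theorem pv_loop_eq (f : String → Int) (t : List String) : ∀ (bs : String) (bo : Int),
    t.foldl (fun p c => if f c > p.2 then (c, f c) else p) (bs, bo)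
    = (if bo = (t.map f).foldl max bo then (bs, bo)
       else match PySem.List.index? (t.map f) ((t.map f).foldl max bo) with
            | some j => (t.getD j "", (t.map f).foldl max bo)
            | none => (bs, bo)) := by
  induction t with
  | nil => intro bs bo; simp
  | cons c t ih =>
    intro bs bo
    simp only [List.foldl_cons, List.map_cons]
    by_cases h : f c > bo
    · rw [if_pos h, ih]
      have hmax : max bo (f c) = f c := by omega
      rw [hmax]
      have hle := (PySem.List.le_foldl_max (List.map f t) (f c)).1
      rw [if_neg (by omega : ¬ bo = List.foldl max (f c) (List.map f t))]
      by_cases hc : f c = List.foldl max (f c) (List.map f t)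
      · rw [if_pos hc, ← hc, PySem.List.index?_cons_self]
        simp
      · rw [if_neg hc, PySem.List.index?_cons_of_ne _ hc]
        have hmem : List.foldl max (f c) (List.map f t) ∈ List.map f t := by
          rcases PySem.List.foldl_max_mem (List.map f t) (f c) with h1 | h1
          · exact absurd h1.symm hc
          · exact h1
        obtain ⟨j, hj⟩ := Option.isSome_iff_exists.mp ((PySem.List.index?_isSome_iff _ _).mpr hmem)
        rw [hj]
        simp
    · rw [if_neg h, ih]
      have hmax : max bo (f c) = bo := by omega
      rw [hmax]
      by_cases hb : bo = List.foldl max bo (List.map f t)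
      · rw [if_pos hb, if_pos hb]
      · rw [if_neg hb, if_neg hb]
        have hle := (PySem.List.le_foldl_max (List.map f t) bo).1
        have hne : f c ≠ List.foldl max bo (List.map f t) := by omega
        rw [PySem.List.index?_cons_of_ne _ hne]
        have hmem : List.foldl max bo (List.map f t) ∈ List.map f t := by
          rcases PySem.List.foldl_max_mem (List.map f t) bo with h1 | h1
          · exact absurd h1.symm hb
          · exact h1
        obtain ⟨j, hj⟩ := Option.isSome_iff_exists.mp ((PySem.List.index?_isSome_iff _ _).mpr hmem)
        rw [hj]
        simp

-- ===== VERDICT (by name: the statement is the Claim_ definition above) =====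
theorem findBestCandidate_spec : Claim_equal_findBestCandidate := by
  intro target string _ hpre
  unfold Spec_findBestCandidate
  cases string with
  | nil => exact absurd rfl hpre
  | cons s t =>
    simp only [findBestCandidate, findBestCandidate_alt]
    rw [pv_overlap_list (fun c => findLargestOverlapPort target.toList c.toList) (s :: t)]
    simp only [List.map_cons]
    rw [PySem.List.max?_id_cons]
    rw [pv_loop_eq (fun c => findLargestOverlapPort target.toList c.toList) t]
    by_cases hs : findLargestOverlapPort target.toList s.toList
        = (t.map (fun c => findLargestOverlapPort target.toList c.toList)).foldl max (findLargestOverlapPort target.toList s.toList)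
    · rw [if_pos hs, ← hs]
      simp only [PySem.List.index?_cons_self]
      simp
    · rw [if_neg hs]
      have hmem : (t.map (fun c => findLargestOverlapPort target.toList c.toList)).foldl max (findLargestOverlapPort target.toList s.toList)
          ∈ t.map (fun c => findLargestOverlapPort target.toList c.toList) := by
        rcases PySem.List.foldl_max_mem (t.map (fun c => findLargestOverlapPort target.toList c.toList)) (findLargestOverlapPort target.toList s.toList) with h1 | h1
        · exact absurd h1.symm hs
        · exact h1
      obtain ⟨j, hj⟩ := Option.isSome_iff_exists.mp ((PySem.List.index?_isSome_iff _ _).mpr hmem)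
      obtain ⟨hk, hval, _⟩ := PySem.List.getElem_of_index?_eq_some hj
      simp only [PySem.List.index?_cons_of_ne _ hs, hj, Option.map_some]
      simp [List.getD_eq_getElem?_getD, List.getElem?_eq_getElem hk, hval]
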